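-- pv_equiv track=rewrite | github.com/DozzzeN/SKG | gl/test_word.py | find_semicolon_and_first_non_digit
-- ===== SOURCE A (Python) =====
-- def find_semicolon_and_first_non_digit(string):
--     semicolon_index = string.find(";")
--
--     if semicolon_index != -1:
--         # 找到分号后的部分
--         after_semicolon = string[semicolon_index + 1:]
--
--         # 移除分号后的空格
--         after_semicolon = after_semicolon.lstrip()
--
--         # 找到分号后的第一个非数字字符的位置
--         for i, char in enumerate(after_semicolon):
--             if not char.isdigit():
--                 non_digit_index = semicolon_index + 1 + i
--                 return semicolon_index, non_digit_index
--
--     # 如果没有找到分号或分号后没有非数字字符，则返回-1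
--     return -1, -1
-- ===== SOURCE B (Python) =====
-- def find_semicolon_and_first_non_digit(string):
--     semicolon_index = string.find(";")
--     if semicolon_index == -1:
--         return -1, -1
--     after_semicolon = string[semicolon_index + 1:].lstrip()
--     trimmed = after_semicolon.lstrip("0123456789")
--     if not trimmed:
--         return -1, -1
--     digit_run = len(after_semicolon) - len(trimmed)
--     return semicolon_index, semicolon_index + 1 + digit_run
-- ===== Notes on version B (the rewrite author's own statement) =====
-- stated objective: alternative
-- what changed: Replaces A's enumerate loop over the stripped tail (return at the first non-digit character) with measuring the leading digit run as a length difference after left-stripping the ten ASCII digit characters, plus a single emptiness test, keeping the identical offset arithmetic.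
import Mathlib
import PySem

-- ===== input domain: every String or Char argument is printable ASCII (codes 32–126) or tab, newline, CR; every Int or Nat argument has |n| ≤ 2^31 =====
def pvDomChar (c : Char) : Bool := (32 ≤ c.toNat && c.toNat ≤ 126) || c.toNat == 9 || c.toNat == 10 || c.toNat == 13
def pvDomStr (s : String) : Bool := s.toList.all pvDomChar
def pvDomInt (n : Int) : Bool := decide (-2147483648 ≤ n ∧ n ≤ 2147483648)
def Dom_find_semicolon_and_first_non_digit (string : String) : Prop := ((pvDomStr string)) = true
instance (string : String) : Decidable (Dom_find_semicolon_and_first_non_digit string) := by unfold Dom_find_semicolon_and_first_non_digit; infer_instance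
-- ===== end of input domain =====

-- B replaces A's enumerate scan for the first non-digit by measuring the leading digit run
-- via lstrip("0123456789"); same return value everywhere (objective: alternative).

-- ===== PORT A =====
-- the 'for i, char in enumerate(after_semicolon)' loop: returns at the first non-digit char
def pvLoopA (semi : Int) : List Char → Int → Option (Int × Int)
  | [], _ => none
  | c :: rest, i =>
    if !(PySem.Chars.isdigit c) then some (semi, semi + 1 + i)
    else pvLoopA semi rest (i + 1)

def find_semicolon_and_first_non_digit (string : String) : Int × Int :=
  let s := string.toList
  let semicolon_index := PySem.Chars.find s [';']
  if semicolon_index ≠ -1 then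
    let after_semicolon := PySem.Chars.slice s (some (semicolon_index + 1)) none
    let after_semicolon := PySem.Chars.lstrip after_semicolon
    match pvLoopA semicolon_index after_semicolon 0 with
    | some p => p
    | none => (-1, -1)
  else (-1, -1)

-- ===== PORT B =====
def pvDigitChars : List Char := ['0', '1', '2', '3', '4', '5', '6', '7', '8', '9']

-- Python's s.lstrip("0123456789") drops the leading chars belonging to that set:
-- ported exactly as dropWhile membership (PySem has no lstrip-with-chars primitive)
def find_semicolon_and_first_non_digit_alt (string : String) : Int × Int :=
  let s := string.toList
  let semicolon_index := PySem.Chars.find s [';']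
  if semicolon_index = -1 then (-1, -1)
  else
    let after_semicolon := PySem.Chars.lstrip (PySem.Chars.slice s (some (semicolon_index + 1)) none)
    let trimmed := after_semicolon.dropWhile (fun c => pvDigitChars.contains c)
    if trimmed.isEmpty then (-1, -1)
    else
      let digit_run : Nat := after_semicolon.length - trimmed.length
      (semicolon_index, semicolon_index + 1 + (digit_run : Int))

-- ===== PRECONDITION & SPEC =====
def Spec_find_semicolon_and_first_non_digit (string : String) (out : Int × Int) : Prop := out = find_semicolon_and_first_non_digit_alt string
instance (string : String) (out : Int × Int) : Decidable (Spec_find_semicolon_and_first_non_digit string out) := by unfold Spec_find_semicolon_and_first_non_digit; infer_instance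

-- ===== CLAIM (what is proved, stated in full; the proofs are below) =====
def Claim_equal_find_semicolon_and_first_non_digit : Prop := ∀ (string : String), Dom_find_semicolon_and_first_non_digit string → Spec_find_semicolon_and_first_non_digit string (find_semicolon_and_first_non_digit string)

-- ===== LEMMAS AND PROOFS =====

lemma char_eq_of_toNat (c d : Char) (h : c.toNat = d.toNat) : c = d :=
  Char.ext (UInt32.toNat_inj.mp h)

-- membership in "0123456789" coincides with Python's per-char isdigit (both are '0' ≤ c ≤ '9')
lemma pv_contains_eq_isdigit (c : Char) : pvDigitChars.contains c = PySem.Chars.isdigit c := by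
  have hmem : c ∈ pvDigitChars ↔ 48 ≤ c.toNat ∧ c.toNat ≤ 57 := by
    constructor
    · intro h; fin_cases h <;> decide
    · intro ⟨h1, h2⟩
      have h : c.toNat = 48 ∨ c.toNat = 49 ∨ c.toNat = 50 ∨ c.toNat = 51 ∨ c.toNat = 52 ∨
          c.toNat = 53 ∨ c.toNat = 54 ∨ c.toNat = 55 ∨ c.toNat = 56 ∨ c.toNat = 57 := by omega
      rcases h with h|h|h|h|h|h|h|h|h|h
      · have : c = '0' := char_eq_of_toNat c '0' (h.trans (by decide))
        simp [this, pvDigitChars]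
      · have : c = '1' := char_eq_of_toNat c '1' (h.trans (by decide))
        simp [this, pvDigitChars]
      · have : c = '2' := char_eq_of_toNat c '2' (h.trans (by decide))
        simp [this, pvDigitChars]
      · have : c = '3' := char_eq_of_toNat c '3' (h.trans (by decide))
        simp [this, pvDigitChars]
      · have : c = '4' := char_eq_of_toNat c '4' (h.trans (by decide))
        simp [this, pvDigitChars]
      · have : c = '5' := char_eq_of_toNat c '5' (h.trans (by decide))
        simp [this, pvDigitChars]
      · have : c = '6' := char_eq_of_toNat c '6' (h.trans (by decide))
        simp [this, pvDigitChars]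
      · have : c = '7' := char_eq_of_toNat c '7' (h.trans (by decide))
        simp [this, pvDigitChars]
      · have : c = '8' := char_eq_of_toNat c '8' (h.trans (by decide))
        simp [this, pvDigitChars]
      · have : c = '9' := char_eq_of_toNat c '9' (h.trans (by decide))
        simp [this, pvDigitChars]
  have hdig : PySem.Chars.isdigit c = true ↔ 48 ≤ c.toNat ∧ c.toNat ≤ 57 := by
    rw [PySem.Chars.isdigit, Bool.and_eq_true, decide_eq_true_iff, decide_eq_true_iff,
        Char.le_def, Char.le_def, UInt32.le_iff_toNat_le, UInt32.le_iff_toNat_le]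
    exact Iff.rfl
  by_cases hd : 48 ≤ c.toNat ∧ c.toNat ≤ 57
  · rw [List.contains_eq_mem, decide_eq_true (hmem.mpr hd), hdig.mpr hd]
  · rw [List.contains_eq_mem, decide_eq_false (fun hm => hd (hmem.mp hm))]
    cases hb : PySem.Chars.isdigit c
    · rfl
    · exact absurd (hdig.mp hb) hd

-- A's scan of a list l started at counter i, phrased as B computes it
lemma pvLoopA_eq (semi : Int) (l : List Char) (i : Int) :
    pvLoopA semi l i =
      (if (l.dropWhile (fun c => pvDigitChars.contains c)).isEmpty then none
       else some (semi, semi + 1 + i +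
         ((l.length - (l.dropWhile (fun c => pvDigitChars.contains c)).length : Nat) : Int))) := by
  induction l generalizing i with
  | nil => simp [pvLoopA]
  | cons c rest ih =>
    rw [pvLoopA]
    by_cases h : PySem.Chars.isdigit c = true
    · have hc : (fun c => pvDigitChars.contains c) c = true := by
        simp only []; rw [pv_contains_eq_isdigit]; exact h
      have hlen : (rest.dropWhile (fun c => pvDigitChars.contains c)).length ≤ rest.length :=
        List.length_dropWhile_le _ _
      rw [if_neg (by simp [h]), ih, List.dropWhile_cons_of_pos hc]
      by_cases ht : (rest.dropWhile (fun c => pvDigitChars.contains c)).isEmpty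
      · rw [if_pos ht, if_pos ht]
      · rw [if_neg ht, if_neg ht]
        simp only [Option.some.injEq, Prod.mk.injEq, List.length_cons, true_and]
        have he : List.dropWhile pvDigitChars.contains rest
            = List.dropWhile (fun c => pvDigitChars.contains c) rest := rfl
        rw [he]
        have hl := hlen
        omega
    · have hc : pvDigitChars.contains c = false := by rw [pv_contains_eq_isdigit]; simp [h]
      rw [if_pos (by simp [h]),
        List.dropWhile_cons_of_neg (p := fun c => pvDigitChars.contains c)
          (by simpa [List.contains_eq_mem] using hc)]
      simp

lemma pv_main_aux (semi : Int) (l : List Char) :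
    (match pvLoopA semi l 0 with | some p => p | none => ((-1 : Int), (-1 : Int))) =
      (if (l.dropWhile (fun c => pvDigitChars.contains c)).isEmpty then ((-1 : Int), (-1 : Int))
       else (semi, semi + 1 +
         ((l.length - (l.dropWhile (fun c => pvDigitChars.contains c)).length : Nat) : Int))) := by
  rw [pvLoopA_eq]
  by_cases ht : (l.dropWhile (fun c => pvDigitChars.contains c)).isEmpty
  · rw [if_pos ht, if_pos ht]
  · rw [if_neg ht, if_neg ht]
    simp

-- ===== VERDICT (by name: the statement is the Claim_ definition above) =====
theorem find_semicolon_and_first_non_digit_spec : Claim_equal_find_semicolon_and_first_non_digit := by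
  intro s _
  unfold Spec_find_semicolon_and_first_non_digit
  show find_semicolon_and_first_non_digit s = find_semicolon_and_first_non_digit_alt s
  unfold find_semicolon_and_first_non_digit find_semicolon_and_first_non_digit_alt
  by_cases h : PySem.Chars.find s.toList [';'] = -1
  · simp [h]
  · simp only [h, ne_eq, not_false_eq_true, if_true, if_false]
    exact pv_main_aux _ _
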